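-- pv_equiv track=rewrite | github.com/hectortrevino3/Algorithmic-Trading-Engine | Algorithmic-Trading-Engine/main.py | parse_period_string
-- ===== SOURCE A (Python) =====
-- def parse_period_string(input_str):
--     periods = []
--     parts = input_str.split(',')
--     max_lookback = 0
--
--     for part in parts:
--         part = part.strip()
--         if '-' in part:
--             try:
--                 start, end = map(int, part.split('-'))
--                 periods.append((max(start, end), min(start, end)))
--                 if max(start, end) > max_lookback: max_lookback = max(start, end)
--             except: pass
--         else:
--             try:
--                 days = int(part)
--                 periods.append((days, 0))
--                 if days > max_lookback: max_lookback = days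
--             except: pass
--
--     return periods, max_lookback
-- ===== SOURCE B (Python) =====
-- def parse_period_string(input_str):
--     def parse_part(raw):
--         part = raw.strip()
--         if '-' in part:
--             pieces = part.split('-')
--             if len(pieces) != 2:
--                 return None
--             try:
--                 a, b = int(pieces[0]), int(pieces[1])
--             except ValueError:
--                 return None
--             return (a, b) if a >= b else (b, a)
--         try:
--             return (int(part), 0)
--         except ValueError:
--             return None
--
--     def collect(parts):
--         # divide and conquer over the comma-split parts (log-depth recursion)
--         if len(parts) == 0:
--             return []
--         if len(parts) == 1:
--             p = parse_part(parts[0])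
--             return [p] if p is not None else []
--         mid = len(parts) // 2
--         return collect(parts[:mid]) + collect(parts[mid:])
--
--     periods = collect(input_str.split(','))
--     return periods, max([0] + [hi for hi, _ in periods])
-- ===== Notes on version B (the rewrite author's own statement) =====
-- stated objective: alternative
-- what changed: B replaces A's single left-to-right loop with its running-max accumulator by a divide-and-conquer recursion that halves the comma-split part list, parses each half independently via an Option-returning per-part parser and concatenates the halves, with max_lookback computed afterwards in one trailing max() reduction.
import Mathlib
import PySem

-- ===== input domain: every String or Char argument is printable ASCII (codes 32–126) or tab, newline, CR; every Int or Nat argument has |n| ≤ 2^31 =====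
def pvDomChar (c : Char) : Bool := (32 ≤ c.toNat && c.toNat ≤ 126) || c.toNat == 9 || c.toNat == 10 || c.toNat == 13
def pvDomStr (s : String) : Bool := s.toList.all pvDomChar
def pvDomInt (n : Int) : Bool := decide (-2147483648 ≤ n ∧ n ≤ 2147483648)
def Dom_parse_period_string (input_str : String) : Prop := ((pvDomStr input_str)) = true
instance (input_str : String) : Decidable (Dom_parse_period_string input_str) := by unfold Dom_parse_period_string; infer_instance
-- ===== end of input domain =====

-- B replaces A's single left-to-right loop with a running max by a divide-and-conquer
-- recursion that halves the part list, parses each half independently and concatenates,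
-- followed by one trailing max() reduction (objective: alternative decomposition, same cost).

-- ===== PORT A =====
-- loop body of A: strip the part, dash branch or plain-int branch, running max
def pvStepA (acc : (List (Int × Int)) × Int) (part0 : String) : (List (Int × Int)) × Int :=
  let part := PySem.Str.strip part0
  if PySem.Str.isIn "-" part then
    match (PySem.Str.split? part "-").getD [] with   -- sep "-" ≠ "": split? is always some
    | [xs, ys] =>
      match PySem.Int.ofStr? xs, PySem.Int.ofStr? ys with
      | some s, some e =>
        (acc.1 ++ [(max s e, min s e)], if max s e > acc.2 then max s e else acc.2)
      | _, _ => acc                                  -- int() raised; except: pass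
    | _ => acc                                       -- unpacking raised; except: pass
  else
    match PySem.Int.ofStr? part with
    | some d => (acc.1 ++ [(d, 0)], if d > acc.2 then d else acc.2)
    | none => acc                                    -- int() raised; except: pass

def parse_period_string (input_str : String) : (List (Int × Int)) × Int :=
  ((PySem.Str.split? input_str ",").getD []).foldl pvStepA ([], 0)

-- ===== PORT B =====
-- B's helper parse_part: one part → Option (Int × Int)
def pvParsePart (raw : String) : Option (Int × Int) :=
  let part := PySem.Str.strip raw
  if PySem.Str.isIn "-" part then
    match (PySem.Str.split? part "-").getD [] with   -- sep "-" ≠ "": split? is always some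
    | [xs, ys] =>                                    -- len(pieces) == 2
      match PySem.Int.ofStr? xs, PySem.Int.ofStr? ys with
      | some a, some b => some (if a ≥ b then (a, b) else (b, a))
      | _, _ => none
    | _ => none
  else
    (PySem.Int.ofStr? part).map (fun d => (d, 0))

-- B's divide-and-conquer collect over the part list
def pvCollect : List String → List (Int × Int)
  | [] => []
  | [raw] =>
    match pvParsePart raw with
    | some p => [p]
    | none => []
  | a :: b :: t =>
    let parts := a :: b :: t
    let mid := parts.length / 2
    pvCollect (parts.take mid) ++ pvCollect (parts.drop mid)
termination_by parts => parts.length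
decreasing_by
  all_goals simp; omega

def parse_period_string_alt (input_str : String) : (List (Int × Int)) × Int :=
  let periods := pvCollect ((PySem.Str.split? input_str ",").getD [])
  (periods,
   (PySem.List.max? ((0 : Int) :: periods.map (fun p => p.1)) (fun y => y)).getD 0)
   -- max([0] + [...]) : the list is nonempty, so Python's max never raises; .getD 0 is a totality guard

-- ===== PRECONDITION & SPEC =====
def Spec_parse_period_string (input_str : String) (out : (List (Int × Int)) × Int) : Prop := out = parse_period_string_alt input_str
instance (input_str : String) (out : (List (Int × Int)) × Int) : Decidable (Spec_parse_period_string input_str out) := by unfold Spec_parse_period_string; infer_instance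

-- ===== CLAIM (what is proved, stated in full; the proofs are below) =====
def Claim_equal_parse_period_string : Prop := ∀ (input_str : String), Dom_parse_period_string input_str → Spec_parse_period_string input_str (parse_period_string input_str)

-- ===== LEMMAS AND PROOFS =====

-- A's loop body, expressed through B's per-part parser
theorem pvStepA_eq (acc : (List (Int × Int)) × Int) (part : String) :
    pvStepA acc part =
      match pvParsePart part with
      | some p => (acc.1 ++ [p], max acc.2 p.1)
      | none => acc := by
  unfold pvStepA pvParsePart
  dsimp only
  generalize PySem.Str.strip part = q
  by_cases hin : PySem.Str.isIn "-" q = true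
  · simp only [hin, if_true]
    generalize (PySem.Str.split? q "-").getD [] = ps
    rcases ps with _ | ⟨x, _ | ⟨y, _ | _⟩⟩
    · rfl
    · rfl
    · rcases hx : PySem.Int.ofStr? x with _ | a <;>
        rcases hy : PySem.Int.ofStr? y with _ | b <;>
        simp [hx, hy, max_def, min_def] <;> (split_ifs <;> simp_all <;> omega)
    · rfl
  · simp only [Bool.not_eq_true] at hin
    simp only [hin, Bool.false_eq_true, if_false]
    rcases hd : PySem.Int.ofStr? q with _ | d <;> simp [Option.map] <;> (split_ifs <;> omega)

-- the loop invariant: A's fold = filtered parse results appended, running max of their firsts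
theorem pvFold_eq (parts : List String) (acc : List (Int × Int)) (m : Int) :
    parts.foldl pvStepA (acc, m) =
      (acc ++ (parts.map pvParsePart).filterMap id,
       ((parts.map pvParsePart).filterMap id).foldl (fun m p => max m p.1) m) := by
  induction parts generalizing acc m with
  | nil => simp
  | cons h t ih =>
    rw [List.foldl_cons, pvStepA_eq]
    rcases hp : pvParsePart h with _ | p
    · simp only [List.map_cons, hp, List.filterMap_cons, id_def]
      exact ih acc m
    · simp only [List.map_cons, hp, List.filterMap_cons, id_def]
      rw [ih (acc ++ [p]) (max m p.1)]
      simp only [List.append_assoc, List.singleton_append, List.foldl_cons]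
      rfl

-- B's divide-and-conquer builds exactly the filtered parse results, in order
set_option maxHeartbeats 1000000 in
theorem pvCollect_eq (parts : List String) :
    pvCollect parts = (parts.map pvParsePart).filterMap id := by
  induction parts using pvCollect.induct with
  | case1 => rw [pvCollect]; simp
  | case2 raw p hp =>
    rw [pvCollect]
    simp only [List.map_cons, List.map_nil, List.filterMap_cons, List.filterMap_nil, hp, id_def]
  | case3 raw hp =>
    rw [pvCollect]
    simp only [List.map_cons, List.map_nil, List.filterMap_cons, List.filterMap_nil, hp, id_def]
  | case4 =>
    rename_i a b t ih1 ih2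
    rw [pvCollect, ih1, ih2, ← List.filterMap_append, ← List.map_append, List.take_append_drop]

-- ===== VERDICT (by name: the statement is the Claim_ definition above) =====
theorem parse_period_string_spec : Claim_equal_parse_period_string := by
  intro input_str _
  unfold Spec_parse_period_string parse_period_string parse_period_string_alt
  rw [pvFold_eq, pvCollect_eq]
  dsimp only
  rw [PySem.List.max?_id_cons]
  simp [List.foldl_map]
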